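-- pv_equiv track=rewrite | github.com/thejtshow/Headlines | SolveHeadlineManually.py | makeTuple
-- ===== SOURCE A (Python) =====
-- def makeTuple(clue):
--     pair = ['', clue]
--     for i, character in enumerate(clue):
--         if character.isalpha():
--             pair[0] += str(character)
--         elif i == (len(clue) - 1) or not clue[i + 1].isalpha():
--             continue
--         else:
--             pair[0] += ' '
--     return pair
-- ===== SOURCE B (Python) =====
-- def makeTuple(clue):
--     # Scan the clue as maximal runs of same str.isalpha key, then render:
--     # letter runs verbatim, each non-letter run as one ' ', trailing non-letter run dropped.
--     runs = []
--     i = 0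
--     n = len(clue)
--     while i < n:
--         k = clue[i].isalpha()
--         j = i + 1
--         while j < n and clue[j].isalpha() == k:
--             j += 1
--         runs.append((k, clue[i:j]))
--         i = j
--     if runs and not runs[-1][0]:
--         runs.pop()
--     cleaned = ''.join(text if k else ' ' for k, text in runs)
--     return [cleaned, clue]
-- ===== Notes on version B (the rewrite author's own statement) =====
-- stated objective: faster
-- what changed: A scans character by character with an index lookahead clue[i+1] and grows the result by repeated string concatenation; B splits the clue into maximal isalpha-keyed runs (outer/inner while loops) and joins them once: letter runs verbatim, each non-letter run as one space, a trailing non-letter run dropped.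
import Mathlib
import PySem

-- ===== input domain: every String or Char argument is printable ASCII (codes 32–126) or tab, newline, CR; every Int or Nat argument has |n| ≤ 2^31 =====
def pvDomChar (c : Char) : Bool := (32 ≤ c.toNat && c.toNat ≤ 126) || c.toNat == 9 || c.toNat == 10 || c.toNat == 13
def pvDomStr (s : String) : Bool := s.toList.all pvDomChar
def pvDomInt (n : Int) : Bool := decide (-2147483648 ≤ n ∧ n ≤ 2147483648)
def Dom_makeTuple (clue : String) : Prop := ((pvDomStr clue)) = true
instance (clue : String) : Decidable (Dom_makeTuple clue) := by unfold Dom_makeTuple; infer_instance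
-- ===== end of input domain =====

-- B replaces A's per-character lookahead scan by a run-based pass (maximal isalpha-runs;
-- letter runs kept, non-letter runs become one space, a trailing non-letter run is dropped); objective: faster (single join instead of per-character string concatenation, measured).


-- ===== PORT A =====
-- loop body of A's for-loop; the `.getD ' '` on clue[i+1] is only reached when i+1 is in
-- range (the `i == len-1` disjunct is tested first), so it is exact.
def stepA (cs : List Char) (acc : List Char) (ic : Int × Char) : List Char :=
  if PySem.Chars.isalpha ic.2 then acc ++ [ic.2]
  else if ic.1 == (cs.length : Int) - 1
          || !(PySem.Chars.isalpha ((PySem.List.pyGet? cs (ic.1 + 1)).getD ' ')) then acc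
  else acc ++ [' ']

def makeTuple (clue : String) : List String :=
  let cs := clue.toList
  let pair0 := (PySem.List.enumerate cs 0).foldl (stepA cs) []
  [String.ofList pair0, clue]

-- ===== PORT B =====
-- the outer while-loop of B: split into maximal runs of equal isalpha key
def pyGroups (cs : List Char) : List (Bool × List Char) :=
  match cs with
  | [] => []
  | c :: rest =>
    (PySem.Chars.isalpha c,
      c :: rest.takeWhile (fun d => PySem.Chars.isalpha d == PySem.Chars.isalpha c))
      :: pyGroups (rest.dropWhile (fun d => PySem.Chars.isalpha d == PySem.Chars.isalpha c))
termination_by cs.length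
decreasing_by
  simp only [List.length_cons]
  have := List.length_dropWhile_le
    (fun d => PySem.Chars.isalpha d == PySem.Chars.isalpha c) rest
  omega

-- drop a trailing non-letter run, then join: letter runs verbatim, others as one space
def renderRuns (runs : List (Bool × List Char)) : List Char :=
  ((match runs.getLast? with
    | some (false, _) => runs.dropLast
    | _ => runs).map (fun (kg : Bool × List Char) => if kg.1 then kg.2 else [' '])).flatten

def makeTuple_alt (clue : String) : List String :=
  [String.ofList (renderRuns (pyGroups clue.toList)), clue]

-- ===== PRECONDITION & SPEC =====
def Spec_makeTuple (clue : String) (out : List String) : Prop := out = makeTuple_alt clue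
instance (clue : String) (out : List String) : Decidable (Spec_makeTuple clue out) := by unfold Spec_makeTuple; infer_instance

-- ===== CLAIM (what is proved, stated in full; the proofs are below) =====
def Claim_equal_makeTuple : Prop := ∀ (clue : String), Dom_makeTuple clue → Spec_makeTuple clue (makeTuple clue)

-- ===== LEMMAS AND PROOFS =====

-- canonical two-character-lookahead recursion both ports are reduced to
def cleanA : List Char → List Char
  | [] => []
  | [c] => if PySem.Chars.isalpha c then [c] else []
  | c :: d :: rest =>
    if PySem.Chars.isalpha c then c :: cleanA (d :: rest)
    else if PySem.Chars.isalpha d then ' ' :: cleanA (d :: rest)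
    else cleanA (d :: rest)

lemma cleanA_cons_alpha (c : Char) (t : List Char) (h : PySem.Chars.isalpha c = true) :
    cleanA (c :: t) = c :: cleanA t := by
  cases t <;> simp [cleanA, h]

lemma cleanA_cons_nonalpha_cons (c d : Char) (r : List Char)
    (h : PySem.Chars.isalpha c = false) :
    cleanA (c :: d :: r) = if PySem.Chars.isalpha d then ' ' :: cleanA (d :: r)
                           else cleanA (d :: r) := by
  simp [cleanA, h]

-- A's fold over `enumerate`, started after a consumed prefix p, computes cleanA of the suffix
lemma loopA_eq (cs : List Char) : ∀ (t p acc : List Char), cs = p ++ t →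
    (PySem.List.enumerate t (p.length : Int)).foldl (stepA cs) acc = acc ++ cleanA t := by
  intro t
  induction t with
  | nil => intro p acc _; simp [PySem.List.enumerate, cleanA]
  | cons c t' ih =>
    intro p acc hcs
    rw [PySem.List.enumerate_cons, List.foldl_cons]
    have hlenN : cs.length = p.length + 1 + t'.length := by
      subst hcs; simp [List.length_append]; omega
    have hlen : (cs.length : Int) = (p.length : Int) + 1 + (t'.length : Int) := by
      rw [hlenN]; push_cast; ring
    have hcast : ((p.length : Int) + 1) = (((p ++ [c]).length : Nat) : Int) := by
      simp
    have hcs' : cs = (p ++ [c]) ++ t' := by simpa using hcs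
    by_cases hal : PySem.Chars.isalpha c = true
    · have h1 : stepA cs acc ((p.length : Int), c) = acc ++ [c] := by
        simp [stepA, hal]
      rw [h1, hcast, ih (p ++ [c]) (acc ++ [c]) hcs', cleanA_cons_alpha c t' hal]
      simp
    · rw [Bool.not_eq_true] at hal
      cases t' with
      | nil =>
        have h1 : stepA cs acc ((p.length : Int), c) = acc := by
          have hb : ((p.length : Int) == (cs.length : Int) - 1) = true := by
            simp only [beq_iff_eq]; rw [hlen]; simp
          simp [stepA, hal, hb]
        rw [h1, hcast, ih (p ++ [c]) acc hcs']
        simp [cleanA, hal]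
      | cons d r =>
        have hget : PySem.List.pyGet? cs ((p.length : Int) + 1) = some d := by
          subst hcs
          have h01 : ((p.length : Int) + 1) = (((p.length + 1 : Nat)) : Int) := by push_cast; ring
          rw [h01, PySem.List.pyGet?_natCast]
          rw [List.getElem?_append_right (by omega)]
          simp
        have hne : ((p.length : Int) == (cs.length : Int) - 1) = false := by
          simp only [beq_eq_false_iff_ne, ne_eq]
          rw [hlen]; push_cast [List.length_cons]; omega
        by_cases hd : PySem.Chars.isalpha d = true
        · have h1 : stepA cs acc ((p.length : Int), c) = acc ++ [' '] := by
            simp [stepA, hal, hne, hget, hd]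
          rw [h1, hcast, ih (p ++ [c]) (acc ++ [' ']) hcs',
              cleanA_cons_nonalpha_cons c d r hal, if_pos hd]
          simp
        · rw [Bool.not_eq_true] at hd
          have h1 : stepA cs acc ((p.length : Int), c) = acc := by
            simp [stepA, hal, hne, hget, hd]
          rw [h1, hcast, ih (p ++ [c]) acc hcs',
              cleanA_cons_nonalpha_cons c d r hal, if_neg (by simp [hd])]

lemma cleanA_alpha_append (a b : List Char) (h : ∀ x ∈ a, PySem.Chars.isalpha x = true) :
    cleanA (a ++ b) = a ++ cleanA b := by
  induction a with
  | nil => simp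
  | cons x a' ih =>
    rw [List.cons_append, cleanA_cons_alpha x (a' ++ b) (h x List.mem_cons_self),
        ih (fun y hy => h y (List.mem_cons_of_mem _ hy))]
    simp

lemma cleanA_alpha_self (a : List Char) (h : ∀ x ∈ a, PySem.Chars.isalpha x = true) :
    cleanA a = a := by
  have := cleanA_alpha_append a [] h
  simpa [cleanA] using this

lemma cleanA_nonalpha_nil (a : List Char) (h : ∀ x ∈ a, PySem.Chars.isalpha x = false) :
    cleanA a = [] := by
  induction a with
  | nil => simp [cleanA]
  | cons x a' ih =>
    have hx := h x List.mem_cons_self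
    cases a' with
    | nil => simp [cleanA, hx]
    | cons d r =>
      rw [cleanA_cons_nonalpha_cons x d r hx,
          if_neg (by simp [h d (by simp)])]
      exact ih (fun y hy => h y (List.mem_cons_of_mem _ hy))

lemma cleanA_nonalpha_append (a b : List Char) (d : Char)
    (ha : ∀ x ∈ a, PySem.Chars.isalpha x = false) (hd : PySem.Chars.isalpha d = true) :
    a ≠ [] → cleanA (a ++ d :: b) = ' ' :: cleanA (d :: b) := by
  induction a with
  | nil => intro h; exact absurd rfl h
  | cons x a' ih =>
    intro _
    have hx := ha x List.mem_cons_self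
    cases a' with
    | nil => simp [cleanA, hx, hd]
    | cons y r =>
      rw [List.cons_append, List.cons_append, cleanA_cons_nonalpha_cons x y (r ++ d :: b) hx,
          if_neg (by simp [ha y (by simp)])]
      exact ih (fun z hz => ha z (List.mem_cons_of_mem _ hz)) (by simp)

lemma pyGroups_cons (c : Char) (rest : List Char) :
    pyGroups (c :: rest) =
      (PySem.Chars.isalpha c,
        c :: rest.takeWhile (fun d => PySem.Chars.isalpha d == PySem.Chars.isalpha c))
        :: pyGroups (rest.dropWhile (fun d => PySem.Chars.isalpha d == PySem.Chars.isalpha c)) := by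
  rw [pyGroups]

lemma pyGroups_nil : pyGroups [] = [] := by rw [pyGroups]

lemma renderRuns_cons₂ (k : Bool) (g : List Char) (b : Bool × List Char)
    (t : List (Bool × List Char)) :
    renderRuns ((k, g) :: b :: t) = (if k then g else [' ']) ++ renderRuns (b :: t) := by
  simp only [renderRuns, List.getLast?_cons_cons]
  cases hx : (b :: t).getLast? with
  | none => simp at hx
  | some x =>
    obtain ⟨kx, u⟩ := x
    cases kx <;> simp [List.dropLast_cons₂]

lemma renderRuns_singleton (k : Bool) (g : List Char) :
    renderRuns [(k, g)] = if k then g else [] := by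
  cases k <;> simp [renderRuns]

lemma head_dropWhile_false {α : Type} (p : α → Bool) :
    ∀ (l : List α) (d : α) (r : List α), l.dropWhile p = d :: r → p d = false := by
  intro l
  induction l with
  | nil => intro d r h; simp [List.dropWhile] at h
  | cons x t ih =>
    intro d r h
    rw [List.dropWhile_cons] at h
    by_cases hx : p x = true
    · rw [if_pos hx] at h; exact ih d r h
    · rw [Bool.not_eq_true] at hx
      rw [if_neg (by simp [hx])] at h
      cases h; exact hx

lemma render_pyGroups : ∀ (n : Nat) (cs : List Char), cs.length ≤ n →
    renderRuns (pyGroups cs) = cleanA cs := by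
  intro n
  induction n with
  | zero =>
    intro cs h
    have : cs = [] := by cases cs <;> simp_all
    subst this
    simp [pyGroups_nil, renderRuns, cleanA]
  | succ n ih =>
    intro cs hlen
    cases cs with
    | nil => simp [pyGroups_nil, renderRuns, cleanA]
    | cons c rest =>
      rw [pyGroups_cons]
      have hsplit := List.takeWhile_append_dropWhile
        (p := fun d => PySem.Chars.isalpha d == PySem.Chars.isalpha c) (l := rest)
      have hrun : ∀ x ∈ c :: rest.takeWhile
          (fun d => PySem.Chars.isalpha d == PySem.Chars.isalpha c),
          PySem.Chars.isalpha x = PySem.Chars.isalpha c := by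
        intro x hx
        rcases List.mem_cons.mp hx with h | h
        · rw [h]
        · simpa using List.mem_takeWhile_imp h
      cases hdwe : rest.dropWhile (fun d => PySem.Chars.isalpha d == PySem.Chars.isalpha c) with
      | nil =>
        rw [pyGroups_nil, renderRuns_singleton]
        rw [hdwe, List.append_nil] at hsplit
        by_cases hk : PySem.Chars.isalpha c = true
        · rw [if_pos hk]
          conv_rhs => rw [← hsplit]
          exact (cleanA_alpha_self _ (fun x hx => (hrun x hx).trans hk)).symm
        · rw [Bool.not_eq_true] at hk
          rw [if_neg (by simp [hk])]
          conv_rhs => rw [← hsplit]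
          exact (cleanA_nonalpha_nil _ (fun x hx => (hrun x hx).trans hk)).symm
      | cons d r =>
        rw [pyGroups_cons d r, renderRuns_cons₂, ← pyGroups_cons d r]
        have hlen2 : (d :: r).length ≤ n := by
          have h1 := List.length_dropWhile_le
            (fun d => PySem.Chars.isalpha d == PySem.Chars.isalpha c) rest
          rw [hdwe] at h1
          simp only [List.length_cons] at hlen h1 ⊢
          omega
        rw [ih (d :: r) hlen2]
        have hrest2 : rest = (rest.takeWhile
            (fun d => PySem.Chars.isalpha d == PySem.Chars.isalpha c)) ++ d :: r := by
          conv_lhs => rw [← hsplit, hdwe]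
        have hdkey : (PySem.Chars.isalpha d == PySem.Chars.isalpha c) = false :=
          head_dropWhile_false _ rest d r hdwe
        by_cases hk : PySem.Chars.isalpha c = true
        · rw [if_pos hk]
          conv_rhs => rw [hrest2, ← List.cons_append]
          exact (cleanA_alpha_append _ _ (fun x hx => (hrun x hx).trans hk)).symm
        · rw [Bool.not_eq_true] at hk
          rw [if_neg (by simp [hk])]
          have hd : PySem.Chars.isalpha d = true := by
            cases h : PySem.Chars.isalpha d
            · rw [h, hk] at hdkey; simp at hdkey
            · rfl
          conv_rhs => rw [hrest2, ← List.cons_append]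
          exact (cleanA_nonalpha_append (c :: _) r d
            (fun x hx => (hrun x hx).trans hk) hd (by simp)).symm

-- ===== VERDICT (by name: the statement is the Claim_ definition above) =====
theorem makeTuple_spec : Claim_equal_makeTuple := by
  intro clue _
  show makeTuple clue = makeTuple_alt clue
  have h1 : (PySem.List.enumerate clue.toList 0).foldl (stepA clue.toList) [] =
      cleanA clue.toList := by
    have h := loopA_eq clue.toList clue.toList [] [] (by simp)
    simpa using h
  show [String.ofList ((PySem.List.enumerate clue.toList 0).foldl (stepA clue.toList) []), clue] =
    [String.ofList (renderRuns (pyGroups clue.toList)), clue]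
  rw [h1, render_pyGroups clue.toList.length clue.toList le_rfl]
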